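-- pv_equiv track=rewrite | github.com/Layso/CSE321-Homeworks | HW4/subarray_finder_151044001.py | min_middle_subarray_finder
-- ===== SOURCE A (Python) =====
-- def min_middle_subarray_finder(array):
-- 	# Preparing variables
-- 	length = len(array)
-- 	mid = int(length/2)
-- 	leftMostIndex = mid
-- 	rightMostIndex = mid
--
--
-- 	# Starting search from mid to left
-- 	index = mid
-- 	sum = 0
-- 	tempSum = sum
-- 	while(index>=0):
-- 		tempSum += array[index]
-- 		if (tempSum<sum):
-- 			sum = tempSum
-- 			leftMostIndex = index
-- 		index -= 1
--
-- 	# Starting search from right to mid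
-- 	index = mid+1
-- 	sum = 0
-- 	tempSum = sum
-- 	while(index<=length-1):
-- 		tempSum += array[index]
-- 		if (tempSum<sum):
-- 			sum = tempSum
-- 			rightMostIndex = index
-- 		index += 1
--
-- 	# Returning part of array that gives minimum sum
-- 	return array[leftMostIndex:rightMostIndex+1]
-- ===== SOURCE B (Python) =====
-- def min_middle_subarray_finder(array):
--     n = len(array)
--     mid = n // 2
--     # cumulative sums of array[mid], array[mid-1], ..., array[0]
--     leftCums = []
--     s = 0
--     for x in reversed(array[:mid + 1]):
--         s += x
--         leftCums.append(s)
--     lo = mid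
--     if leftCums:
--         m = min(leftCums)
--         if m < 0:
--             lo = mid - leftCums.index(m)
--     # cumulative sums of array[mid+1], ..., array[n-1]
--     rightCums = []
--     s = 0
--     for x in array[mid + 1:]:
--         s += x
--         rightCums.append(s)
--     hi = mid
--     if rightCums:
--         m = min(rightCums)
--         if m < 0:
--             hi = mid + 1 + rightCums.index(m)
--     return array[lo:hi + 1]
-- ===== Notes on version B (the rewrite author's own statement) =====
-- stated objective: alternative
-- what changed: A tracks a running minimum and best index inside two scan loops anchored at the middle; B instead materialises the two cumulative-sum lists (middle-to-left and middle-to-right), takes min() and the first-occurrence index() of each, and slices, defaulting to the middle when the minimum is not negative.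
import Mathlib
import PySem

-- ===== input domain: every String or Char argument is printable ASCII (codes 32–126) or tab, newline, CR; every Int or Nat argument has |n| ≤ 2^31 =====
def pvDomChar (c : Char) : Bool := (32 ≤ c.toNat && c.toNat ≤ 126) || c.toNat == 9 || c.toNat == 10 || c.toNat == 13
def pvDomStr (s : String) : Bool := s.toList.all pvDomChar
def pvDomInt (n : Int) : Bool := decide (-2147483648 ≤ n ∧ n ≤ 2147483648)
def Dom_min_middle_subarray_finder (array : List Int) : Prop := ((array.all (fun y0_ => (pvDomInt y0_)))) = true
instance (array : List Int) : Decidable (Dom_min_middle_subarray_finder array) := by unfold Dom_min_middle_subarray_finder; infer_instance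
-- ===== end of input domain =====

-- B replaces A's two scan-and-track while loops by building the two cumulative-sum lists and taking the
-- first argmin of each (objective: alternative decomposition, same O(n) cost); equivalence is proved on
-- all non-empty lists (A raises IndexError on [], where B returns []).

-- ===== PORT A =====
-- body shared by A's two while loops: state (sum, tempSum, recordedIndex), reads array[index]
-- (pyGetD's default 0 is never used: every index the loops visit is in range on non-empty input)
def pvLoopBody (array : List Int) (st : Int × Int × Int) (index : Int) : Int × Int × Int :=
  let tempSum := st.2.1 + PySem.List.pyGetD array index 0
  if tempSum < st.1 then (tempSum, tempSum, index) else (st.1, tempSum, st.2.2)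

def min_middle_subarray_finder (array : List Int) : List Int :=
  let length : Int := (array.length : Int)
  let mid : Int := PySem.Int.floordiv length 2  -- int(length/2) = length // 2 for length ≥ 0
  -- while index >= 0, counting down from mid
  let leftMostIndex := ((PySem.List.pyRange mid (-1) (-1)).foldl (pvLoopBody array) (0, 0, mid)).2.2
  -- while index <= length-1, counting up from mid+1
  let rightMostIndex := ((PySem.List.pyRange (mid + 1) length 1).foldl (pvLoopBody array) (0, 0, mid)).2.2
  PySem.List.slice array (some leftMostIndex) (some (rightMostIndex + 1))

-- ===== PORT B =====
-- cumulative sums of a list (Source B's append loop)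
def pvCumsB (seq : List Int) : List Int :=
  (seq.foldl (fun (p : List Int × Int) x => (p.1 ++ [p.2 + x], p.2 + x)) (([] : List Int), (0 : Int))).1

def min_middle_subarray_finder_alt (array : List Int) : List Int :=
  let n : Int := (array.length : Int)
  let mid : Int := PySem.Int.floordiv n 2
  let leftCums := pvCumsB (PySem.List.slice array none (some (mid + 1))).reverse
  let lo : Int :=
    match PySem.List.min? leftCums (fun x => x) with
    | none => mid                                 -- empty leftCums: lo stays mid
    | some m =>
        if m < 0 then mid - (((PySem.List.index? leftCums m).getD 0 : Nat) : Int) else mid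
  let rightCums := pvCumsB (PySem.List.slice array (some (mid + 1)) none)
  let hi : Int :=
    match PySem.List.min? rightCums (fun x => x) with
    | none => mid
    | some m =>
        if m < 0 then mid + 1 + (((PySem.List.index? rightCums m).getD 0 : Nat) : Int) else mid
  PySem.List.slice array (some lo) (some (hi + 1))

-- ===== PRECONDITION & SPEC =====
-- A raises IndexError on the empty list (it reads array[0] in its first loop); Pre_ excludes exactly that input.
def Pre_min_middle_subarray_finder (array : List Int) : Prop := array ≠ []
instance (array : List Int) : Decidable (Pre_min_middle_subarray_finder array) := by
  unfold Pre_min_middle_subarray_finder; infer_instance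
def pvWitness_min_middle_subarray_finder : List Int := [2, -3, 1, -4, 2]

def Spec_min_middle_subarray_finder (array : List Int) (out : List Int) : Prop := out = min_middle_subarray_finder_alt array
instance (array : List Int) (out : List Int) : Decidable (Spec_min_middle_subarray_finder array out) := by unfold Spec_min_middle_subarray_finder; infer_instance

-- ===== CLAIM (what is proved, stated in full; the proofs are below) =====
def Claim_equal_min_middle_subarray_finder : Prop := ∀ (array : List Int), Dom_min_middle_subarray_finder array → Pre_min_middle_subarray_finder array → Spec_min_middle_subarray_finder array (min_middle_subarray_finder array)
-- ===== LEMMAS AND PROOFS =====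

-- cumulative sums starting from accumulator t (the mathematical shape of pvCumsB)
def pvCums (t : Int) : List Int → List Int
  | [] => []
  | v :: vs => (t + v) :: pvCums (t + v) vs

-- A's tracking loop, abstracted over the value list vs and the tag (index) list ts
def pvScan : List Int → List Int → Int → Int → Int → Int
  | v :: vs', t :: ts', sum, temp, b =>
      let temp' := temp + v
      if temp' < sum then pvScan vs' ts' temp' temp' t else pvScan vs' ts' sum temp' b
  | _, _, _, _, b => b

lemma length_pvCums (vs : List Int) : ∀ t, (pvCums t vs).length = vs.length := by
  induction vs with
  | nil => intro t; rfl
  | cons v vs ih => intro t; simp [pvCums, ih]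

lemma pvFoldlMin (l : List Int) : ∀ a b : Int, l.foldl min (min a b) = min a (l.foldl min b) := by
  induction l with
  | nil => intro a b; rfl
  | cons c l ih => intro a b; simp only [List.foldl]; rw [min_assoc, ih]

lemma pvMinCons (a : Int) (xs : List Int) :
    PySem.List.min? (a :: xs) (fun x => x)
      = some (match PySem.List.min? xs (fun x => x) with | none => a | some m => min a m) := by
  cases xs with
  | nil => simp [PySem.List.min?]
  | cons h tt =>
      rw [PySem.List.min?_id_cons, PySem.List.min?_id_cons]
      simp only [List.foldl]
      rw [pvFoldlMin]

-- A's loop lands where the running minimum is last strictly improved: that is the tag of the FIRST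
-- minimum of the cumulative-sum list (the baseline 'sum' starts at the third argument).
lemma pvScan_char : ∀ (vs ts : List Int) (sum temp b : Int), vs.length = ts.length →
    pvScan vs ts sum temp b =
      (match PySem.List.min? (pvCums temp vs) (fun x => x) with
       | none => b
       | some m =>
           if m < sum then
             (match PySem.List.index? (pvCums temp vs) m with
              | some i => ts.getD i b
              | none => b)
           else b) := by
  intro vs
  induction vs with
  | nil =>
      intro ts sum temp b hlen
      simp [pvScan, pvCums, PySem.List.min?]
  | cons v vs' ih =>
      intro ts sum temp b hlen
      cases ts with
      | nil => simp at hlen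
      | cons t ts' =>
        have hlen' : vs'.length = ts'.length := by simpa using hlen
        show (if temp + v < sum then pvScan vs' ts' (temp+v) (temp+v) t
              else pvScan vs' ts' sum (temp+v) b) = _
        rw [show pvCums temp (v::vs') = (temp+v) :: pvCums (temp+v) vs' from rfl]
        rw [pvMinCons]
        cases hmin : PySem.List.min? (pvCums (temp+v) vs') (fun x => x) with
        | none =>
            have hnil : pvCums (temp+v) vs' = [] := by
              rwa [PySem.List.min?_eq_none_iff] at hmin
            have hvs : vs' = [] := by
              have := length_pvCums vs' (temp+v); rw [hnil] at this; simpa using this.symm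
            subst hvs
            simp only []
            rw [PySem.List.index?_cons_self]
            by_cases h1 : temp + v < sum
            · simp [pvScan, h1, List.getD]
            · simp [pvScan, h1]
        | some m' =>
            have hm'mem : m' ∈ pvCums (temp+v) vs' := PySem.List.min?_mem hmin
            have hsome : (PySem.List.index? (pvCums (temp+v) vs') m').isSome := by
              rw [PySem.List.index?_isSome_iff]; exact hm'mem
            obtain ⟨i, hi⟩ := Option.isSome_iff_exists.mp hsome
            obtain ⟨hiLen, hgetEq, -⟩ := PySem.List.getElem_of_index?_eq_some hi
            have hiTs : i < ts'.length := by
              rw [← hlen', ← length_pvCums vs' (temp+v)]; exact hiLen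
            have hgetD : ∀ d : Int, ts'.getD i d = ts'[i] := fun d => List.getD_eq_getElem ts' d hiTs
            by_cases h1 : temp + v < sum
            · rw [if_pos h1, ih ts' (temp+v) (temp+v) t hlen', hmin]
              simp only []
              by_cases h2 : m' < temp + v
              · have hmineq : min (temp+v) m' = m' := min_eq_right h2.le
                have hne : temp+v ≠ m' := ne_of_gt h2
                rw [hmineq, PySem.List.index?_cons_of_ne _ hne, hi]
                simp only [Option.map_some, if_pos h2, if_pos (lt_trans h2 h1),
                  List.getD_cons_succ, hgetD]
              · have hmineq : min (temp+v) m' = temp+v := min_eq_left (not_lt.mp h2)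
                rw [hmineq, PySem.List.index?_cons_self]
                simp only [if_neg h2, if_pos h1, List.getD_cons_zero]
            · rw [if_neg h1, ih ts' sum (temp+v) b hlen', hmin]
              simp only []
              by_cases h3 : m' < sum
              · have h2 : m' < temp + v := lt_of_lt_of_le h3 (not_lt.mp h1)
                have hmineq : min (temp+v) m' = m' := min_eq_right h2.le
                have hne : temp+v ≠ m' := ne_of_gt h2
                rw [hmineq, PySem.List.index?_cons_of_ne _ hne, hi]
                simp only [Option.map_some, if_pos h3, List.getD_cons_succ, hgetD]
              · have hmineq : ¬ (min (temp+v) m' < sum) :=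
                  not_lt.mpr (le_min (not_lt.mp h1) (not_lt.mp h3))
                rw [if_neg h3, if_neg hmineq]

-- pvScan in B's first-argmin form, with an arbitrary index-to-tag function f
lemma pvScan_side (vs ts : List Int) (d : Int) (f : Nat → Int)
    (hlen : vs.length = ts.length)
    (htag : ∀ i : Nat, i < ts.length → ts.getD i d = f i) :
    pvScan vs ts 0 0 d =
      (match PySem.List.min? (pvCums 0 vs) (fun x => x) with
       | none => d
       | some m => if m < 0 then f ((PySem.List.index? (pvCums 0 vs) m).getD 0) else d) := by
  rw [pvScan_char vs ts 0 0 d hlen]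
  cases hmin : PySem.List.min? (pvCums 0 vs) (fun x => x) with
  | none => rfl
  | some m =>
      simp only []
      by_cases hm : m < 0
      · rw [if_pos hm, if_pos hm]
        have hmem := PySem.List.min?_mem hmin
        have hsome : (PySem.List.index? (pvCums 0 vs) m).isSome := by
          rw [PySem.List.index?_isSome_iff]; exact hmem
        obtain ⟨i, hi⟩ := Option.isSome_iff_exists.mp hsome
        obtain ⟨hiLen, -, -⟩ := PySem.List.getElem_of_index?_eq_some hi
        have hiTs : i < ts.length := by rw [← hlen, ← length_pvCums vs 0]; exact hiLen
        rw [hi]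
        simp only [Option.getD_some]
        exact htag i hiTs
      · rw [if_neg hm, if_neg hm]

lemma pvTakeMapRange (l : List Int) (m : Nat) (h : m ≤ l.length) :
    (List.range m).map (fun k => l.getD k 0) = l.take m := by
  apply List.ext_getElem
  · simp [h]
  · intro i h1 h2
    have hi : i < m := by simpa using h1
    have hil : i < l.length := lt_of_lt_of_le hi h
    simp [List.getElem?_eq_getElem hil]

lemma foldA_eq_pvScan (g : Int → Int) (body : (Int × Int × Int) → Int → Int × Int × Int)
    (hbody : ∀ st i, body st i =
      (let tempSum := st.2.1 + g i
       if tempSum < st.1 then (tempSum, tempSum, i) else (st.1, tempSum, st.2.2))) :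
    ∀ (idxs : List Int) (s t b : Int),
    (idxs.foldl body (s, t, b)).2.2 = pvScan (idxs.map g) idxs s t b := by
  intro idxs
  induction idxs with
  | nil => intro s t b; rfl
  | cons i idxs ih =>
      intro s t b
      simp only [List.foldl, List.map, pvScan, hbody]
      by_cases h : t + g i < s
      · simp [h, ih]
      · simp [h, ih]

lemma pvCumsB_go (seq : List Int) : ∀ (acc : List Int) (t : Int),
    (seq.foldl (fun (p : List Int × Int) x => (p.1 ++ [p.2 + x], p.2 + x)) (acc, t)).1
      = acc ++ pvCums t seq := by
  induction seq with
  | nil => intro acc t; simp [pvCums]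
  | cons v vs ih => intro acc t; simp [List.foldl, pvCums, ih]

lemma pvCumsB_eq (seq : List Int) : pvCumsB seq = pvCums 0 seq := by
  simpa using pvCumsB_go seq [] 0

lemma pv_main (array : List Int) (hpre : array ≠ []) :
    min_middle_subarray_finder array = min_middle_subarray_finder_alt array := by
  unfold min_middle_subarray_finder min_middle_subarray_finder_alt
  have hlen0 : 0 < array.length := List.length_pos_iff.mpr hpre
  have hmid : PySem.Int.floordiv (array.length : Int) 2 = ((array.length / 2 : Nat) : Int) := by
    exact_mod_cast PySem.Int.floordiv_natCast array.length 2
  simp only [hmid]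
  set M := array.length / 2 with hM
  have hMlt : M < array.length := Nat.div_lt_self hlen0 (by norm_num)
  have hgA := foldA_eq_pvScan (fun i => PySem.List.pyGetD array i 0) (pvLoopBody array)
    (fun st i => rfl)
  -- left values: the countdown range reads (array.take (M+1)).reverse
  have hLvals : (PySem.List.pyRange (M:Int) (-1) (-1)).map (fun i => PySem.List.pyGetD array i 0)
      = (array.take (M+1)).reverse := by
    rw [PySem.List.pyRange_neg_one_eq_reverse, List.map_reverse]
    congr 1
    rw [show ((-1:Int) + 1) = 0 from by norm_num,
        show ((M:Int) + 1) = ((M+1 : Nat) : Int) from by push_cast; ring,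
        PySem.List.pyRange_zero_natCast, List.map_map]
    rw [show ((fun i => PySem.List.pyGetD array i 0) ∘ fun (k:Nat) => (k:Int))
        = fun (k:Nat) => array.getD k 0 from funext fun k => by simp,
        pvTakeMapRange array (M+1) (by omega)]
  have hlenL : ((array.take (M+1)).reverse).length = (PySem.List.pyRange (M:Int) (-1) (-1)).length := by
    rw [PySem.List.length_pyRange_neg_one]
    simp; omega
  have htagL : ∀ i : Nat, i < (PySem.List.pyRange (M:Int) (-1) (-1)).length →
      (PySem.List.pyRange (M:Int) (-1) (-1)).getD i ((M:Int)) = (M:Int) - (i:Int) := by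
    intro i hi
    rw [PySem.List.length_pyRange_neg_one] at hi
    rw [PySem.List.pyRange_neg_one,
        PySem.List.getD_map_range _ _ _ _ (by omega : i < ((M:Int) - (-1)).toNat)]
  -- right values: the upward range reads array.drop (M+1)
  have hRvals : (PySem.List.pyRange ((M:Int)+1) (array.length : Int) 1).map
        (fun i => PySem.List.pyGetD array i 0) = array.drop (M+1) := by
    have h := PySem.List.map_pyGetD_pyRange' array 0 (a := (M:Int)+1) (by omega)
    rw [h]
    congr 1
  have hlenR : (array.drop (M+1)).length = (PySem.List.pyRange ((M:Int)+1) (array.length : Int) 1).length := by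
    rw [PySem.List.length_pyRange_one]
    simp; omega
  have htagR : ∀ i : Nat, i < (PySem.List.pyRange ((M:Int)+1) (array.length : Int) 1).length →
      (PySem.List.pyRange ((M:Int)+1) (array.length : Int) 1).getD i ((M:Int)) = (M:Int) + 1 + (i:Int) := by
    intro i hi
    rw [PySem.List.length_pyRange_one] at hi
    rw [PySem.List.pyRange_one,
        PySem.List.getD_map_range _ _ _ _ (by omega : i < ((array.length : Int) - ((M:Int)+1)).toNat)]
  -- B's slices
  have hsl : PySem.List.slice array none (some ((M:Int)+1)) = array.take (M+1) := by
    rw [show ((M:Int)+1) = ((M+1:Nat):Int) from by push_cast; ring, PySem.List.slice_to_natCast]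
  have hsr : PySem.List.slice array (some ((M:Int)+1)) none = array.drop (M+1) := by
    rw [show ((M:Int)+1) = ((M+1:Nat):Int) from by push_cast; ring, PySem.List.slice_from_natCast]
  rw [hgA, hgA, hLvals, hRvals, hsl, hsr, pvCumsB_eq, pvCumsB_eq,
      pvScan_side ((array.take (M+1)).reverse) _ _ (fun i => (M:Int) - (i:Int)) hlenL htagL,
      pvScan_side (array.drop (M+1)) _ _ (fun i => (M:Int) + 1 + (i:Int)) hlenR htagR]

-- ===== VERDICT (by name: the statement is the Claim_ definition above) =====
theorem min_middle_subarray_finder_spec : Claim_equal_min_middle_subarray_finder := by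
  intro array _ hpre
  unfold Spec_min_middle_subarray_finder
  exact pv_main array hpre
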